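-- pv_equiv track=rewrite | github.com/tkschuler/RadioWinds | Sandbox/360wind.py | count_unique_servo_circles
-- ===== SOURCE A (Python) =====
-- def count_unique_servo_circles(angles):
--     unique_circles = set()
--     clockwise_circles = 0
--     counterclockwise_circles = 0
--     prev_angle = None
--     prev_direction = None
--
--     for angle in angles:
--         if prev_angle is not None:
--             # Determine the angle difference between the current and previous angles
--             angle_diff = (angle - prev_angle + 180) % 360 - 180  # Correct for crossing 0/360-degree axis
--
--             if angle_diff > 0:
--                 direction = "clockwise"
--             else:
--                 direction = "counterclockwise"
--
--             # Check if a complete circle is formed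
--             if prev_direction is not None and direction != prev_direction:
--                 circle = (min(prev_angle, angle), max(prev_angle, angle))
--                 unique_circles.add(circle)
--                 if direction == "clockwise":
--                     clockwise_circles += 1
--                 else:
--                     counterclockwise_circles += 1
--
--             prev_direction = direction
--
--         prev_angle = angle
--
--     return len(unique_circles), clockwise_circles, counterclockwise_circles
-- ===== SOURCE B (Python) =====
-- def count_unique_servo_circles(angles):
--     # Direction changes alternate: each change flips the direction, so the
--     # directions at change points strictly alternate, starting opposite to
--     # the initial step direction.  Hence the clockwise/counterclockwise
--     # tallies follow from the total change count k and dirs[0] alone.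
--     a = list(angles)
--     dirs = [((y - x + 180) % 360 - 180) > 0 for x, y in zip(a, a[1:])]
--     k = sum(d0 != d1 for d0, d1 in zip(dirs, dirs[1:]))
--     if k == 0:
--         return 0, 0, 0
--     cw = k // 2 if dirs[0] else (k + 1) // 2
--     circles = {(x, y) if x <= y else (y, x)
--                for x, y, d0, d1 in zip(a[1:], a[2:], dirs, dirs[1:]) if d0 != d1}
--     return len(circles), cw, k - cw
-- ===== Notes on version B (the rewrite author's own statement) =====
-- stated objective: alternative
-- what changed: B never tallies per-change directions: it uses the invariant that change directions strictly alternate (each change flips the direction), so clockwise/counterclockwise counts are a parity closed form of the total change count k and the first step direction, with only the unique-segment set still collected from the change positions.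
import Mathlib
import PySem

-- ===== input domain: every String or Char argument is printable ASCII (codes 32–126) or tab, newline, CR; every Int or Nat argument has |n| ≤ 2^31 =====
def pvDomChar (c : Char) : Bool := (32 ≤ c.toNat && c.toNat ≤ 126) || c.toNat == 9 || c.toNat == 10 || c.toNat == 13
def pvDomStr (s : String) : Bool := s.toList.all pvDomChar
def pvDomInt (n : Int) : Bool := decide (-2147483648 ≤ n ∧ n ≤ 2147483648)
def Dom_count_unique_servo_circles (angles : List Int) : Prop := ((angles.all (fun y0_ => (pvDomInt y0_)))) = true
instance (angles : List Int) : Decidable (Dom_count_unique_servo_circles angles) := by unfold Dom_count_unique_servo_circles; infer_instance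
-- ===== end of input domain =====

-- B drops A's per-change direction tallies: change directions strictly alternate, so the
-- clockwise/counterclockwise counts are a parity closed form of the change count and the
-- first step direction (same cost; objective: alternative).

-- ===== PORT A =====
def cscStep (st : PySem.Set (Int × Int) × Int × Int × Option Int × Option String) (angle : Int) :
    PySem.Set (Int × Int) × Int × Int × Option Int × Option String :=
  match st with
  | (uc, cw, ccw, prevA, prevD) =>
    match prevA with
    | none => (uc, cw, ccw, some angle, prevD)
    | some prev =>
      let angle_diff := PySem.Int.mod (angle - prev + 180) 360 - 180
      let direction := if angle_diff > 0 then "clockwise" else "counterclockwise"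
      match prevD with
      | none => (uc, cw, ccw, some angle, some direction)
      | some pd =>
        if direction ≠ pd then
          let circle := (min prev angle, max prev angle)
          let uc' := PySem.Set.add uc circle
          if direction = "clockwise" then (uc', cw + 1, ccw, some angle, some direction)
          else (uc', cw, ccw + 1, some angle, some direction)
        else (uc, cw, ccw, some angle, some direction)

def count_unique_servo_circles (angles : List Int) : Int × Int × Int :=
  let r := angles.foldl cscStep (PySem.Set.empty, 0, 0, none, none)
  (PySem.Set.len r.1, r.2.1, r.2.2.1)

-- ===== PORT B =====
def count_unique_servo_circles_alt (angles : List Int) : Int × Int × Int :=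
  let a := angles
  let dirs : List Bool := (a.zip (a.drop 1)).map
    (fun p => decide (PySem.Int.mod (p.2 - p.1 + 180) 360 - 180 > 0))
  let k : Int := (((dirs.zip (dirs.drop 1)).filter (fun q => q.1 != q.2)).length : Int)
  if k = 0 then (0, 0, 0)
  else
    let cw : Int := if dirs.getD 0 false then PySem.Int.floordiv k 2
                    else PySem.Int.floordiv (k + 1) 2
    let circles : PySem.Set (Int × Int) := PySem.Set.ofList
      ((((a.drop 1).zip ((a.drop 2).zip (dirs.zip (dirs.drop 1)))).filter
          (fun t => t.2.2.1 != t.2.2.2)).map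
        (fun t => if t.1 ≤ t.2.1 then (t.1, t.2.1) else (t.2.1, t.1)))
    (PySem.Set.len circles, cw, k - cw)

-- ===== PRECONDITION & SPEC =====
def Spec_count_unique_servo_circles (angles : List Int) (out : Int × Int × Int) : Prop := out = count_unique_servo_circles_alt angles
instance (angles : List Int) (out : Int × Int × Int) : Decidable (Spec_count_unique_servo_circles angles out) := by unfold Spec_count_unique_servo_circles; infer_instance

-- ===== CLAIM =====
def Claim_equal_count_unique_servo_circles : Prop := ∀ (angles : List Int), Dom_count_unique_servo_circles angles → Spec_count_unique_servo_circles angles (count_unique_servo_circles angles)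

-- ===== LEMMAS AND PROOFS =====

def dirB (x y : Int) : Bool := decide (PySem.Int.mod (y - x + 180) 360 - 180 > 0)
def strOf (d : Bool) : String := if d then "clockwise" else "counterclockwise"
def circOf (c : Int × Int × Bool) : Int × Int := (min c.1 c.2.1, max c.1 c.2.1)

def changesOf (prev : Int) (pd : Bool) : List Int → List (Int × Int × Bool)
  | [] => []
  | x :: xs => (if dirB prev x != pd then [(prev, x, dirB prev x)] else []) ++ changesOf x (dirB prev x) xs

def dirsFrom (prev : Int) : List Int → List Bool
  | [] => []
  | x :: xs => dirB prev x :: dirsFrom x xs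

lemma dir_strOf (p a : Int) :
    (if PySem.Int.mod (a - p + 180) 360 - 180 > 0 then "clockwise" else "counterclockwise") = strOf (dirB p a) := by
  by_cases h : PySem.Int.mod (a - p + 180) 360 - 180 > 0 <;> simp [strOf, dirB, h]

lemma cscStep_some (uc : PySem.Set (Int × Int)) (cw ccw : Int) (prev : Int) (pd : Bool) (angle : Int) :
    cscStep (uc, cw, ccw, some prev, some (strOf pd)) angle =
      if dirB prev angle != pd then
        (PySem.Set.add uc (min prev angle, max prev angle),
         cw + (if dirB prev angle then 1 else 0),
         ccw + (if dirB prev angle then 0 else 1),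
         some angle, some (strOf (dirB prev angle)))
      else (uc, cw, ccw, some angle, some (strOf (dirB prev angle))) := by
  have hdir := dir_strOf prev angle
  simp only [cscStep]
  rw [hdir]
  cases hd : dirB prev angle <;> cases pd <;> simp [strOf]

lemma out3_foldl (xs : List Int) : ∀ (prev : Int) (pd : Bool) (uc : PySem.Set (Int × Int)) (cw ccw : Int),
    (xs.foldl cscStep (uc, cw, ccw, some prev, some (strOf pd)))
    = ((changesOf prev pd xs).foldl (fun s c => PySem.Set.add s (circOf c)) uc,
       cw + (((changesOf prev pd xs).filter (fun c => c.2.2)).length : Int),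
       ccw + (((changesOf prev pd xs).filter (fun c => !c.2.2)).length : Int),
       (xs.foldl cscStep (uc, cw, ccw, some prev, some (strOf pd))).2.2.2) := by
  induction xs with
  | nil => intro prev pd uc cw ccw; simp [changesOf, List.foldl]
  | cons x xs ih =>
    intro prev pd uc cw ccw
    by_cases h : dirB prev x = pd
    · have hb : (dirB prev x != pd) = false := by simp [h]
      have hc : changesOf prev pd (x :: xs) = changesOf x (dirB prev x) xs := by
        simp [changesOf, hb]
      rw [List.foldl_cons, cscStep_some, hb, hc]
      simp only [Bool.false_eq_true, if_false]
      rw [ih x (dirB prev x) uc cw ccw]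
    · have hb : (dirB prev x != pd) = true := by simp [h]
      have hc : changesOf prev pd (x :: xs) = (prev, x, dirB prev x) :: changesOf x (dirB prev x) xs := by
        simp [changesOf, hb]
      rw [List.foldl_cons, cscStep_some, hb, hc]
      simp only [if_true]
      rw [ih x (dirB prev x) (PySem.Set.add uc (min prev x, max prev x))
            (cw + (if dirB prev x then 1 else 0)) (ccw + (if dirB prev x then 0 else 1))]
      cases hd : dirB prev x <;>
        simp [hd, List.filter_cons, circOf] <;>
        omega

lemma dirs_eq (x : Int) (xs : List Int) :
    ((x :: xs).zip ((x :: xs).drop 1)).map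
      (fun p => decide (PySem.Int.mod (p.2 - p.1 + 180) 360 - 180 > 0)) = dirsFrom x xs := by
  induction xs generalizing x with
  | nil => rfl
  | cons y ys ih => simp [dirsFrom, dirB, ← ih y]

lemma len_changes (xs : List Int) : ∀ (prev : Int) (b : Bool),
    (((b :: dirsFrom prev xs).zip (dirsFrom prev xs)).filter (fun q => q.1 != q.2)).length
      = (changesOf prev b xs).length := by
  induction xs with
  | nil => intro prev b; simp [dirsFrom, changesOf]
  | cons x xs ih =>
    intro prev b
    have hih := ih x (dirB prev x)
    simp only [dirsFrom, List.zip_cons_cons, List.filter_cons, changesOf, bne] at hih ⊢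
    by_cases h : dirB prev x = b
    · simp [h] at hih ⊢
      exact hih
    · have h' : ¬ b = dirB prev x := fun hh => h hh.symm
      simp [h, h'] at hih ⊢
      exact hih

lemma circ_changes (xs : List Int) : ∀ (prev : Int) (b : Bool),
    (((prev :: xs).zip (xs.zip ((b :: dirsFrom prev xs).zip (dirsFrom prev xs)))).filter
        (fun t => t.2.2.1 != t.2.2.2)).map
      (fun t : Int × Int × Bool × Bool => if t.1 ≤ t.2.1 then (t.1, t.2.1) else (t.2.1, t.1))
      = (changesOf prev b xs).map circOf := by
  induction xs with
  | nil => intro prev b; simp [dirsFrom, changesOf]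
  | cons x xs ih =>
    intro prev b
    simp only [dirsFrom, List.zip_cons_cons, List.filter_cons, changesOf]
    have hcirc : (if prev ≤ x then (prev, x) else (x, prev)) = circOf (prev, x, dirB prev x) := by
      by_cases hle : prev ≤ x <;> simp [circOf, min_def, max_def, hle]
    by_cases h : dirB prev x = b
    · have hih := ih x (dirB prev x)
      simp only [bne] at hih ⊢
      simp [h] at hih ⊢
      exact hih
    · have h' : ¬ b = dirB prev x := fun hh => h hh.symm
      have hih := ih x (dirB prev x)
      simp only [bne] at hih ⊢
      simp [h, h', hcirc] at hih ⊢
      exact hih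

lemma cnt_alt (xs : List Int) : ∀ (prev : Int) (pd : Bool),
    ((changesOf prev pd xs).filter (fun c => c.2.2)).length
      = if pd then (changesOf prev pd xs).length / 2 else ((changesOf prev pd xs).length + 1) / 2 := by
  induction xs with
  | nil => intro prev pd; cases pd <;> simp [changesOf]
  | cons x xs ih =>
    intro prev pd
    by_cases h : dirB prev x = pd
    · have : changesOf prev pd (x :: xs) = changesOf x (dirB prev x) xs := by
        simp [changesOf, h]
      rw [this, ih x (dirB prev x), h]
    · have hb : (dirB prev x != pd) = true := by simp [h]
      have hpd : dirB prev x = !pd := by cases pd <;> cases hd : dirB prev x <;> simp_all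
      have hrec := ih x (dirB prev x) ; rw [hpd] at hrec
      have : changesOf prev pd (x :: xs) = (prev, x, !pd) :: changesOf x (!pd) xs := by
        simp [changesOf, hb, hpd]
      rw [this, List.filter_cons]
      cases pd <;> simp only [Bool.not_false, Bool.not_true] at hrec ⊢ <;>
        simp only [if_true, if_false, Bool.false_eq_true, Bool.true_eq_false] at hrec ⊢ <;>
        simp [hrec] <;> omega

lemma cntSplit (l : List (Int × Int × Bool)) :
    (l.filter (fun c => c.2.2)).length + (l.filter (fun c => !c.2.2)).length = l.length := by
  induction l with
  | nil => rfl
  | cons c t ih => by_cases h : c.2.2 = true <;> simp [h] <;> omega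

-- ===== VERDICT =====
theorem count_unique_servo_circles_spec : Claim_equal_count_unique_servo_circles := by
  unfold Claim_equal_count_unique_servo_circles
  intro angles _
  unfold Spec_count_unique_servo_circles
  rcases angles with _ | ⟨x, _ | ⟨y, rest⟩⟩
  · rfl
  · rfl
  · -- reduce A to the changesOf characterisation
    have hst : (x :: y :: rest).foldl cscStep (PySem.Set.empty, 0, 0, none, none)
        = rest.foldl cscStep (PySem.Set.empty, 0, 0, some y, some (strOf (dirB x y))) := by
      rw [List.foldl_cons, List.foldl_cons]
      rw [show cscStep (PySem.Set.empty, 0, 0, none, none) x = (PySem.Set.empty, 0, 0, some x, none) from rfl]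
      rw [show cscStep (PySem.Set.empty, 0, 0, some x, none) y
            = (PySem.Set.empty, 0, 0, some y, some (strOf (dirB x y))) from by
        simp only [cscStep]; rw [dir_strOf]]
    have hA : count_unique_servo_circles (x :: y :: rest)
        = (PySem.Set.len (PySem.Set.ofList ((changesOf y (dirB x y) rest).map circOf)),
           (((changesOf y (dirB x y) rest).filter (fun c => c.2.2)).length : Int),
           (((changesOf y (dirB x y) rest).filter (fun c => !c.2.2)).length : Int)) := by
      show (PySem.Set.len ((x :: y :: rest).foldl cscStep (PySem.Set.empty, 0, 0, none, none)).1,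
            ((x :: y :: rest).foldl cscStep (PySem.Set.empty, 0, 0, none, none)).2.1,
            ((x :: y :: rest).foldl cscStep (PySem.Set.empty, 0, 0, none, none)).2.2.1) = _
      rw [hst, out3_foldl rest y (dirB x y) PySem.Set.empty 0 0]
      have hset : (changesOf y (dirB x y) rest).foldl (fun s c => PySem.Set.add s (circOf c)) PySem.Set.empty
          = PySem.Set.ofList ((changesOf y (dirB x y) rest).map circOf) := by
        rw [PySem.Set.ofList_eq_foldl, List.foldl_map]; rfl
      rw [hset]; simp only [zero_add]
    -- reduce B
    have hdirs := dirs_eq x (y :: rest)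
    have hdf : dirsFrom x (y :: rest) = dirB x y :: dirsFrom y rest := rfl
    have hk : (((dirB x y :: dirsFrom y rest).zip ((dirB x y :: dirsFrom y rest).drop 1)).filter
          (fun q => q.1 != q.2)).length = (changesOf y (dirB x y) rest).length := by
      simpa using len_changes rest y (dirB x y)
    have hcl : ((((x :: y :: rest).drop 1).zip (((x :: y :: rest).drop 2).zip
            ((dirB x y :: dirsFrom y rest).zip ((dirB x y :: dirsFrom y rest).drop 1)))).filter
          (fun t => t.2.2.1 != t.2.2.2)).map
        (fun t : Int × Int × Bool × Bool => if t.1 ≤ t.2.1 then (t.1, t.2.1) else (t.2.1, t.1))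
        = (changesOf y (dirB x y) rest).map circOf := by
      simpa using circ_changes rest y (dirB x y)
    rw [hA]
    show _ = count_unique_servo_circles_alt (x :: y :: rest)
    unfold count_unique_servo_circles_alt
    simp only [hdirs, hdf, hk, hcl]
    by_cases hk0 : (changesOf y (dirB x y) rest).length = 0
    · have hnil : (changesOf y (dirB x y) rest) = [] := List.length_eq_zero_iff.mp hk0
      rw [hnil]
      simp
    · have hne : (((changesOf y (dirB x y) rest).length : Int) = 0) = False := by simp [hk0]
      simp only [hne, if_false, List.getD_cons_zero]
      have hcw := cnt_alt rest y (dirB x y)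
      have hsplit := cntSplit (changesOf y (dirB x y) rest)
      have h2 : PySem.Int.floordiv ((changesOf y (dirB x y) rest).length : Int) 2 = (((changesOf y (dirB x y) rest).length / 2 : Nat) : Int) := by
        exact_mod_cast PySem.Int.floordiv_natCast (changesOf y (dirB x y) rest).length 2
      have h3 : PySem.Int.floordiv (((changesOf y (dirB x y) rest).length : Int) + 1) 2 = ((((changesOf y (dirB x y) rest).length + 1) / 2 : Nat) : Int) := by
        have := PySem.Int.floordiv_natCast ((changesOf y (dirB x y) rest).length + 1) 2
        push_cast at this ⊢
        exact this
      refine Prod.ext rfl (Prod.ext ?_ ?_)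
    -- clockwise component
      · cases hd : dirB x y <;> rw [hd] at hcw h2 h3 <;>
          simp only [if_true, if_false, Bool.false_eq_true] at hcw <;>
          simp only [hd, if_true, if_false, Bool.false_eq_true, h2, h3, hcw]
    -- counterclockwise component
      · cases hd : dirB x y <;> rw [hd] at hcw h2 h3 hsplit <;>
          simp only [if_true, if_false, Bool.false_eq_true] at hcw <;>
          simp only [hd, if_true, if_false, Bool.false_eq_true, h2, h3] <;>
          omega
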